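-- pv_equiv track=rewrite | github.com/daniel-reich/ubiquitous-fiesta | LhAgbJ7nv3EDSLuYa_5.py | golomb
-- ===== SOURCE A (Python) =====
-- def golomb(n):
--     res = [1,2]
--     num = 2
--     while len(res)<n:
--         while res.count(num)<res[num-1]:
--             res+=[num]
--         num+=1
--     while len(res)>n:
--         res.pop()
--     return res
-- ===== SOURCE B (Python) =====
-- def golomb(n):
--     if n <= 0:
--         return []
--     seq = [1, 2, 2]
--     num = 3
--     while len(seq) < n:
--         seq.extend([num] * seq[num - 1])
--         num += 1
--     return seq[:n]
-- ===== Notes on version B (the rewrite author's own statement) =====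
-- stated objective: faster
-- what changed: B generates the sequence by run-lengths (append seq[num-1] copies of num in one extend, then slice to n) instead of A's repeated full-list count() scans inside a nested while, and pops are replaced by a slice.
-- crash fix: On negative n A raises IndexError (its trailing pop loop pops from an empty list); B returns the empty list. — e.g. on golomb(-1): A raises IndexError, B returns []
import Mathlib
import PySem

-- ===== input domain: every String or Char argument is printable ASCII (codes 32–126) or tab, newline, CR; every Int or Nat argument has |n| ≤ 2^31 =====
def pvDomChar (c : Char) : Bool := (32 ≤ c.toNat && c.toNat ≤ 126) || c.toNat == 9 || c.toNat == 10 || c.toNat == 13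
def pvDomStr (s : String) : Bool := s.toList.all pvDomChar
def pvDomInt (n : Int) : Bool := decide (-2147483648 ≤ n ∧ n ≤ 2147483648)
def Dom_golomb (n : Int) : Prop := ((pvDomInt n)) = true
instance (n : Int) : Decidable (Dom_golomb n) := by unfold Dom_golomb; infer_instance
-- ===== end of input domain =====

-- B replaces A's quadratic count()-driven inner while loop by a linear run-length extend
-- (append seq[num-1] copies of num at once) and A's trailing pop loop by a slice; the
-- timing run measured B asymptotically faster. Equivalence is about the return value.

-- ===== PORT A =====
-- inner: while res.count(num) < res[num-1]: res += [num]   (fuel makes it total; none = IndexError, unreachable under Pre_)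
def golombInnerA (res : List Int) (num : Int) : Nat → List Int
  | 0 => res
  | f + 1 =>
    match PySem.List.pyGet? res (num - 1) with
    | none => res
    | some t => if (PySem.List.count res num : Int) < t then golombInnerA (res ++ [num]) num f else res

-- outer: while len(res) < n: <inner>; num += 1
def golombOuterA (n : Int) : List Int → Int → Nat → List Int
  | res, _, 0 => res
  | res, num, f + 1 =>
    if (res.length : Int) < n then
      golombOuterA n (golombInnerA res num (n.toNat + num.toNat + res.length + 1)) (num + 1) f
    else res

-- while len(res) > n: res.pop()
def golombPopA (n : Int) : List Int → Nat → List Int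
  | res, 0 => res
  | res, f + 1 =>
    if n < (res.length : Int) then
      match PySem.List.pop? res with
      | none => res
      | some (_, r) => golombPopA n r f
    else res

def golomb (n : Int) : List Int :=
  let res := golombOuterA n [1, 2] 2 (n.toNat + 1)
  golombPopA n res res.length

-- ===== PORT B =====
-- while len(seq) < n: seq.extend([num] * seq[num-1]); num += 1
def golombLoopB (n : Int) : List Int → Int → Nat → List Int
  | seq, _, 0 => seq
  | seq, num, f + 1 =>
    if (seq.length : Int) < n then
      match PySem.List.pyGet? seq (num - 1) with
      | none => seq
      | some t => golombLoopB n (seq ++ List.replicate t.toNat num) (num + 1) f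
    else seq

def golomb_alt (n : Int) : List Int :=
  if n ≤ 0 then []
  else PySem.List.slice (golombLoopB n [1, 2, 2] 3 n.toNat) none (some n)

-- ===== PRECONDITION & SPEC =====
-- Pre_ excludes negative n, on which A raises IndexError (it pops from an empty list).
def Pre_golomb (n : Int) : Prop := 0 ≤ n
instance (n : Int) : Decidable (Pre_golomb n) := by unfold Pre_golomb; infer_instance
def pvWitness_golomb : Int := 5

-- On negative n A raises IndexError (its trailing pop loop pops from an empty list); B returns the empty list.
def Raises_golomb (n : Int) : Prop := n < 0
instance (n : Int) : Decidable (Raises_golomb n) := by unfold Raises_golomb; infer_instance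
def pvRaiseWitness_golomb : Int := -1
def pvRaiseWitnessOut_golomb : List Int := []

def Spec_golomb (n : Int) (out : List Int) : Prop := out = golomb_alt n
instance (n : Int) (out : List Int) : Decidable (Spec_golomb n out) := by unfold Spec_golomb; infer_instance

-- ===== CLAIM (what is proved, stated in full; the proofs are below) =====
def Claim_equal_golomb : Prop := ∀ (n : Int), Dom_golomb n → Pre_golomb n → Spec_golomb n (golomb n)
def Claim_raises_golomb : Prop := (∀ (n : Int), Dom_golomb n → Raises_golomb n → ¬ Pre_golomb n) ∧ (Dom_golomb (pvRaiseWitness_golomb) ∧ Raises_golomb (pvRaiseWitness_golomb) ∧ golomb_alt (pvRaiseWitness_golomb) = pvRaiseWitnessOut_golomb)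

-- ===== LEMMAS AND PROOFS =====

-- the pop loop truncates to the first n elements
theorem golombPopA_eq_take (n : Int) (hn : 0 ≤ n) :
    ∀ (f : Nat) (res : List Int), res.length ≤ f → golombPopA n res f = res.take n.toNat := by
  intro f
  induction f with
  | zero =>
    intro res h
    have : res = [] := List.eq_nil_of_length_eq_zero (Nat.le_zero.mp h)
    simp [this, golombPopA]
  | succ f ih =>
    intro res h
    by_cases hlt : n < (res.length : Int)
    · rcases res.eq_nil_or_concat with rfl | ⟨l, a, rfl⟩
      · simp at hlt; omega
      · simp only [List.concat_eq_append] at h hlt ⊢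
        rw [golombPopA, if_pos hlt, PySem.List.pop?_last]
        have hlen : l.length ≤ f := by simpa using h
        show golombPopA n l f = List.take n.toNat (l ++ [a])
        rw [ih l hlen]
        have hn' : n.toNat ≤ l.length := by simp at hlt; omega
        rw [List.take_append_of_le_length hn']
    · rw [golombPopA, if_neg hlt]
      have : res.length ≤ n.toNat := by omega
      exact (List.take_of_length_le this).symm

-- the inner while loop appends exactly the missing copies of num
theorem golombInnerA_eq_append (num t : Int) :
    ∀ (k : Nat) (res : List Int) (f : Nat),
      PySem.List.pyGet? res (num - 1) = some t →
      0 ≤ num - 1 →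
      (num - 1 : Int) < res.length →
      ((PySem.List.count res num : Int) + k = t) →
      k + 1 ≤ f →
      golombInnerA res num f = res ++ List.replicate k num := by
  intro k
  induction k with
  | zero =>
    intro res f hget _ _ hcnt hf
    obtain ⟨f', rfl⟩ : ∃ f', f = f' + 1 := ⟨f - 1, by omega⟩
    rw [golombInnerA, hget]
    show (if (PySem.List.count res num : Int) < t then golombInnerA (res ++ [num]) num f' else res)
        = res ++ List.replicate 0 num
    rw [if_neg (by push_cast at hcnt; omega)]
    simp
  | succ k ih =>
    intro res f hget h0 hlt hcnt hf
    obtain ⟨f', rfl⟩ : ∃ f', f = f' + 1 := ⟨f - 1, by omega⟩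
    rw [golombInnerA, hget]
    show (if (PySem.List.count res num : Int) < t then golombInnerA (res ++ [num]) num f' else res)
        = res ++ List.replicate (k + 1) num
    rw [if_pos (by push_cast at hcnt; omega)]
    have hget' : PySem.List.pyGet? (res ++ [num]) (num - 1) = some t := by
      rw [PySem.List.pyGet?_eq_some_getElem res h0 (by exact_mod_cast hlt)] at hget
      rw [PySem.List.pyGet?_eq_some_getElem (res ++ [num]) h0 (by rw [List.length_append]; push_cast; omega)]
      rw [← hget]
      congr 1
      exact List.getElem_append_left (by omega)
    have hlt' : (num - 1 : Int) < ((res ++ [num]).length : Int) := by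
      rw [List.length_append]; push_cast; omega
    have hcnt' : ((PySem.List.count (res ++ [num]) num : Int) + k = t) := by
      simp [PySem.List.count, List.count_append] at hcnt ⊢
      omega
    rw [ih (res ++ [num]) f' hget' h0 hlt' hcnt' (by omega)]
    simp [List.append_assoc, List.replicate_succ]

-- joint invariant of the two main loops
def GInv (res : List Int) (num : Int) : Prop :=
  3 ≤ num ∧ num ≤ (res.length : Int) ∧ ∀ x ∈ res, 1 ≤ x ∧ x < num

-- with the invariant, A's outer loop and B's loop compute the same list, step for step
theorem outerA_eq_loopB (n : Int) :
    ∀ (f : Nat) (res : List Int) (num : Int), GInv res num →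
      golombOuterA n res num f = golombLoopB n res num f := by
  intro f
  induction f with
  | zero => intro res num _; rfl
  | succ f ih =>
    intro res num hinv
    obtain ⟨h3, hlen, hmem⟩ := hinv
    by_cases hg : (res.length : Int) < n
    · rw [golombOuterA, if_pos hg, golombLoopB, if_pos hg]
      have h0 : 0 ≤ num - 1 := by omega
      have hlt : (num - 1 : Int) < res.length := by omega
      have hidx : (num - 1).toNat < res.length := by omega
      set t := res[(num - 1).toNat] with ht
      have hget : PySem.List.pyGet? res (num - 1) = some t :=
        PySem.List.pyGet?_eq_some_getElem _ h0 (by exact_mod_cast hlt)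
      have htmem : t ∈ res := List.getElem_mem hidx
      obtain ⟨ht1, ht2⟩ := hmem t htmem
      have hcount : PySem.List.count res num = 0 := by
        simp [PySem.List.count]
        rw [List.count_eq_zero]
        intro hc
        exact absurd (hmem num hc).2 (by omega)
      have hA : golombInnerA res num (n.toNat + num.toNat + res.length + 1)
          = res ++ List.replicate t.toNat num := by
        apply golombInnerA_eq_append num t t.toNat res _ hget h0 hlt
        · rw [hcount]; push_cast; omega
        · omega
      rw [hA, hget]
      apply ih
      have hlen2 : num + 1 ≤ (((res ++ List.replicate t.toNat num).length : Nat) : Int) := by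
        simp only [List.length_append, List.length_replicate]
        omega
      refine ⟨by omega, hlen2, ?_⟩
      intro x hx
      rcases List.mem_append.mp hx with hx | hx
      · exact ⟨(hmem x hx).1, by have := (hmem x hx).2; omega⟩
      · have : x = num := List.eq_of_mem_replicate hx
        omega
    · rw [golombOuterA, if_neg hg, golombLoopB, if_neg hg]

-- ===== VERDICT (by name: the statement is the Claim_ definition above) =====
theorem golomb_spec : Claim_equal_golomb := by
  intro n _ hpre
  unfold Spec_golomb golomb golomb_alt
  by_cases hsmall : n ≤ 2
  · have h0 : (0:Int) ≤ n := hpre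
    interval_cases n <;> decide
  · rw [not_le] at hsmall
    rw [if_neg (by omega)]
    -- unfold A's first outer iteration: it turns [1,2] into [1,2,2] and num into 3
    have hstep : golombOuterA n [1, 2] 2 (n.toNat + 1) = golombOuterA n [1, 2, 2] 3 n.toNat := by
      rw [golombOuterA, if_pos (by simp; omega)]
      rw [golombInnerA_eq_append 2 2 1 [1, 2] _ (by decide) (by decide) (by decide) (by decide) (by omega)]
      norm_num [List.replicate]
    have hinv : GInv [1, 2, 2] 3 := by
      refine ⟨by omega, by simp, ?_⟩
      intro x hx
      simp at hx
      rcases hx with rfl | rfl | rfl <;> omega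
    rw [hstep, outerA_eq_loopB n n.toNat [1, 2, 2] 3 hinv]
    rw [golombPopA_eq_take n (by omega) _ _ (le_refl _)]
    rw [PySem.List.slice_to _ (by omega)]

theorem golomb_raises : Claim_raises_golomb := by
  unfold Claim_raises_golomb
  exact ⟨fun n _ hr hp => absurd hp (by unfold Pre_golomb Raises_golomb at *; omega), by decide⟩

-- self-check: the raise witness really lies in Raises_ and B's port returns the stated value there
theorem golomb_raises_witness_ok :
    Raises_golomb pvRaiseWitness_golomb ∧ golomb_alt pvRaiseWitness_golomb = pvRaiseWitnessOut_golomb :=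
  ⟨golomb_raises.2.2.1, golomb_raises.2.2.2⟩
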